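-- pv_equiv track=rewrite | github.com/Bigdata-com/bigdata-cookbook | Tracking_Inflation_Drivers/src/labels.py | split_text_on_nearest_linebreak
-- ===== SOURCE A (Python) =====
-- def split_text_on_nearest_linebreak(text_string, num_splits):
--     """Splits the text string into `num_splits` parts, with each split occurring at the nearest line break.
--     Also appends the start and last part of string1 to string2 for context."""
--
--     split_texts = [text_string]
--
--     for _ in range(num_splits - 1):  # We split num_splits - 1 times, the last one is automatic
--         new_splits = []
--         for text in split_texts:
--             mid_index = len(text) // 2
--
--             # Find the closest line break before or after the midpoint
--             before_split = text.rfind('/', 0, mid_index)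
--             after_split = text.find('/', mid_index)
--
--             # Choose the closest split point, favoring the one before the midpoint
--             if before_split != -1:
--                 split_index = before_split
--             elif after_split != -1:
--                 split_index = after_split
--             else:
--                 # If no line break is found, split at the midpoint
--                 split_index = mid_index
--
--             # Split the string into two parts
--             string1 = text[:split_index]
--             string2 = text[split_index:]
--
--             # Take the start of string1 and append to the start of string2 (for context)
--             start_of_string1 = string1.split('/')[:3]  # First 3 lines of string1
--             last_part_of_string1 = string1.split('/')[-3:]  # Last 3 lines of string1
--
--             # Append both to string2 for continuity
--             string2 = '/'.join(start_of_string1) + '/'.join(last_part_of_string1) + '/' + string2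
--
--             new_splits.extend([string1, string2])  # Add both parts to the new_splits list
--
--         split_texts = new_splits  # Update the split_texts with the newly split texts
--
--     return split_texts
-- ===== SOURCE B (Python) =====
-- def _split_once(text):
--     mid_index = len(text) // 2
--     before_split = text.rfind('/', 0, mid_index)
--     after_split = text.find('/', mid_index)
--     if before_split != -1:
--         split_index = before_split
--     elif after_split != -1:
--         split_index = after_split
--     else:
--         split_index = mid_index
--     string1 = text[:split_index]
--     string2 = text[split_index:]
--     parts = string1.split('/')
--     string2 = '/'.join(parts[:3]) + '/'.join(parts[-3:]) + '/' + string2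
--     return string1, string2
--
--
-- def _rec(text, depth):
--     """Divide and conquer: split once, then recurse on each half."""
--     if depth <= 0:
--         return [text]
--     string1, string2 = _split_once(text)
--     return _rec(string1, depth - 1) + _rec(string2, depth - 1)
--
--
-- def split_text_on_nearest_linebreak(text_string, num_splits):
--     return _rec(text_string, num_splits - 1)
-- ===== Notes on version B (the rewrite author's own statement) =====
-- stated objective: alternative
-- what changed: Replaced the level-by-level BFS doubling loop (rebuild the whole list num_splits-1 times) with a divide-and-conquer recursion: split once, recurse on each half, concatenate; leaf order is unchanged because each per-text transform is independent.
import Mathlib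
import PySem

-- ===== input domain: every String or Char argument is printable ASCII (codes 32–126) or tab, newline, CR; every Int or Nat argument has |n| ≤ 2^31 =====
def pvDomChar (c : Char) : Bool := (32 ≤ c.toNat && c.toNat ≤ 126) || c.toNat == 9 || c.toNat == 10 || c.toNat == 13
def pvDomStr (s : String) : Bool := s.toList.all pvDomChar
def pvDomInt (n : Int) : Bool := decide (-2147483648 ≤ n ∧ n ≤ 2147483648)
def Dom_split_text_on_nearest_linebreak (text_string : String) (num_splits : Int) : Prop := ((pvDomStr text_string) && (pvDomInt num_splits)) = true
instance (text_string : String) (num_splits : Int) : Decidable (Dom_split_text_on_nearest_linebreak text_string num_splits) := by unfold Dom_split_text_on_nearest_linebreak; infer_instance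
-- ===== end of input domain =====

-- B replaces A's level-by-level doubling loop by a divide-and-conquer recursion (same cost; different decomposition).

-- ===== PORT A =====
-- A: BFS — repeat (num_splits - 1) times: rebuild the whole list, splitting every text once.
def split_text_on_nearest_linebreak (text_string : String) (num_splits : Int) : List String :=
  (List.range (num_splits - 1).toNat).foldl
    (fun split_texts _ =>
      split_texts.foldl
        (fun new_splits text =>
          let mid_index := PySem.Int.floordiv (PySem.Str.len text) 2
          let before_split := PySem.Str.rfindFrom text "/" 0 (some mid_index)
          let after_split := PySem.Str.findFrom text "/" mid_index none
          let split_index :=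
            if before_split ≠ -1 then before_split
            else if after_split ≠ -1 then after_split
            else mid_index
          let string1 := PySem.Str.slice text none (some split_index)
          let string2 := PySem.Str.slice text (some split_index) none
          let start_of_string1 := PySem.List.slice ((PySem.Str.split? string1 "/").getD []) none (some 3)
          let last_part_of_string1 := PySem.List.slice ((PySem.Str.split? string1 "/").getD []) (some (-3)) none
          let string2 := PySem.Str.join "/" start_of_string1 ++ PySem.Str.join "/" last_part_of_string1 ++ "/" ++ string2
          new_splits ++ [string1, string2])
        [])
    [text_string]

-- ===== PORT B =====
-- B helper: one split of one text (identical per-text logic)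
def pvSplitOnce (text : String) : String × String :=
  let mid_index := PySem.Int.floordiv (PySem.Str.len text) 2
  let before_split := PySem.Str.rfindFrom text "/" 0 (some mid_index)
  let after_split := PySem.Str.findFrom text "/" mid_index none
  let split_index :=
    if before_split ≠ -1 then before_split
    else if after_split ≠ -1 then after_split
    else mid_index
  let string1 := PySem.Str.slice text none (some split_index)
  let string2 := PySem.Str.slice text (some split_index) none
  let parts := (PySem.Str.split? string1 "/").getD []
  (string1,
   PySem.Str.join "/" (PySem.List.slice parts none (some 3)) ++
   PySem.Str.join "/" (PySem.List.slice parts (some (-3)) none) ++ "/" ++ string2)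

-- B helper: divide and conquer — split once, recurse on each half
def pvRec (text : String) : Nat → List String
  | 0 => [text]
  | d + 1 =>
    let p := pvSplitOnce text
    pvRec p.1 d ++ pvRec p.2 d

def split_text_on_nearest_linebreak_alt (text_string : String) (num_splits : Int) : List String :=
  pvRec text_string (num_splits - 1).toNat

-- ===== PRECONDITION & SPEC =====
def Spec_split_text_on_nearest_linebreak (text_string : String) (num_splits : Int) (out : List String) : Prop := out = split_text_on_nearest_linebreak_alt text_string num_splits
instance (text_string : String) (num_splits : Int) (out : List String) : Decidable (Spec_split_text_on_nearest_linebreak text_string num_splits out) := by unfold Spec_split_text_on_nearest_linebreak; infer_instance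

-- ===== CLAIM (what is proved, stated in full; the proofs are below) =====
def Claim_equal_split_text_on_nearest_linebreak : Prop := ∀ (text_string : String) (num_splits : Int), Dom_split_text_on_nearest_linebreak text_string num_splits → Spec_split_text_on_nearest_linebreak text_string num_splits (split_text_on_nearest_linebreak text_string num_splits)

-- ===== LEMMAS AND PROOFS =====

-- A's inner loop body appends exactly the two halves pvSplitOnce computes
def pvLevel (xs : List String) : List String :=
  xs.flatMap (fun t => [(pvSplitOnce t).1, (pvSplitOnce t).2])

lemma pvInner_eq (xs : List String) (acc : List String) :
    xs.foldl
        (fun new_splits text =>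
          let mid_index := PySem.Int.floordiv (PySem.Str.len text) 2
          let before_split := PySem.Str.rfindFrom text "/" 0 (some mid_index)
          let after_split := PySem.Str.findFrom text "/" mid_index none
          let split_index :=
            if before_split ≠ -1 then before_split
            else if after_split ≠ -1 then after_split
            else mid_index
          let string1 := PySem.Str.slice text none (some split_index)
          let string2 := PySem.Str.slice text (some split_index) none
          let start_of_string1 := PySem.List.slice ((PySem.Str.split? string1 "/").getD []) none (some 3)
          let last_part_of_string1 := PySem.List.slice ((PySem.Str.split? string1 "/").getD []) (some (-3)) none
          let string2 := PySem.Str.join "/" start_of_string1 ++ PySem.Str.join "/" last_part_of_string1 ++ "/" ++ string2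
          new_splits ++ [string1, string2]) acc
      = acc ++ pvLevel xs := by
  induction xs generalizing acc with
  | nil => simp [pvLevel]
  | cons t ts ih =>
    simp only [List.foldl_cons, ih, pvLevel, List.flatMap_cons, List.append_assoc]
    rfl

-- one more BFS level on the leaves of pvRec gives pvRec at the next depth
lemma pvLevel_pvRec (t : String) (k : Nat) : pvLevel (pvRec t k) = pvRec t (k + 1) := by
  induction k generalizing t with
  | zero => simp [pvRec, pvLevel]
  | succ k ih =>
    have hsplit : pvLevel (pvRec (pvSplitOnce t).1 k ++ pvRec (pvSplitOnce t).2 k)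
        = pvLevel (pvRec (pvSplitOnce t).1 k) ++ pvLevel (pvRec (pvSplitOnce t).2 k) := by
      simp [pvLevel]
    rw [show pvRec t (k + 1) = pvRec (pvSplitOnce t).1 k ++ pvRec (pvSplitOnce t).2 k from rfl,
        hsplit, ih, ih]
    rfl

theorem pvMain (t : String) (n : Int) :
    split_text_on_nearest_linebreak t n = split_text_on_nearest_linebreak_alt t n := by
  unfold split_text_on_nearest_linebreak split_text_on_nearest_linebreak_alt
  generalize (n - 1).toNat = k
  induction k with
  | zero => rfl
  | succ k ih =>
    rw [List.range_succ, List.foldl_append, ih, List.foldl_cons, List.foldl_nil,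
        pvInner_eq, List.nil_append, pvLevel_pvRec]

-- ===== VERDICT (by name: the statement is the Claim_ definition above) =====
theorem split_text_on_nearest_linebreak_spec : Claim_equal_split_text_on_nearest_linebreak := by
  intro t n _
  exact pvMain t n
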